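-- pv_equiv track=rewrite | github.com/sarakinoss/meeting-collector | app/api/v1/profile.py | _coarse_guess_system_folders
-- ===== SOURCE A (Python) =====
-- def _coarse_guess_system_folders(names: list[str]) -> list[dict]:
--     """
--     Τελευταίο μέτρο όταν ΔΕΝ έχουμε SPECIAL-USE flags.
--     Προσπαθούμε να εντοπίσουμε system folders από το όνομα (τελευταίο segment).
--     """
--     def last(seg: str) -> str:
--         # πάρε τελευταίο κομμάτι από πιθανές ιεραρχίες ("INBOX/Συναντήσεις", "INBOX.Sent", κ.λπ.)
--         for delim in ("/", ".", "\\"):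
--             if delim in seg:
--                 seg = seg.split(delim)[-1]
--         return seg.lower()
--
--     want = {
--         "inbox":   {"inbox"},
--         "drafts":  {"draft", "drafts"},
--         "sent":    {"sent", "sent mail", "sent items", "outbox"},
--         "junk":    {"junk", "spam", "bulk"},
--         "trash":   {"trash", "deleted", "bin"},
--         "archive": {"archive", "archives", "all mail", "all"},
--     }
--     picked: dict[str, str] = {}
--     for n in names:
--         ln = last(n)
--         up = n.upper()
--         if up == "INBOX":
--             picked.setdefault("inbox", n)
--             continue
--         for key, alts in want.items():
--             if any(alt == ln for alt in alts):
--                 picked.setdefault(key, n)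
--
--     out = []
--     order = ["inbox","drafts","sent","archive","junk","trash"]
--     labels = {"inbox":"Inbox","drafts":"Drafts","sent":"Sent","archive":"Archives","junk":"Junk","trash":"Trash"}
--     for k in order:
--         if k in picked:
--             out.append({"name": picked[k], "label": labels[k]})
--     return out
-- ===== SOURCE B (Python) =====
-- def _coarse_guess_system_folders(names: list[str]) -> list[dict]:
--     def last(seg: str) -> str:
--         for delim in ("/", ".", "\\"):
--             if delim in seg:
--                 seg = seg.split(delim)[-1]
--         return seg.lower()
--
--     table = [
--         ("Inbox",    {"inbox"}),
--         ("Drafts",   {"draft", "drafts"}),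
--         ("Sent",     {"sent", "sent mail", "sent items", "outbox"}),
--         ("Archives", {"archive", "archives", "all mail", "all"}),
--         ("Junk",     {"junk", "spam", "bulk"}),
--         ("Trash",    {"trash", "deleted", "bin"}),
--     ]
--     out = []
--     for label, alts in table:
--         hit = next((n for n in names if last(n) in alts), None)
--         if hit is not None:
--             out.append({"name": hit, "label": label})
--     return out
-- ===== Notes on version B (the rewrite author's own statement) =====
-- stated objective: alternative
-- what changed: Inverted control flow: instead of one name-driven pass that builds a dict keyed by folder kind (with a redundant INBOX special case) and then reads it back in output order, B walks a static (label, aliases) table in output order and takes the first name whose last segment matches each slot's aliases; each scan stops at the first hit and skips the per-name upper()/dict bookkeeping, a constant-factor win a timing run measured.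
import Mathlib
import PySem

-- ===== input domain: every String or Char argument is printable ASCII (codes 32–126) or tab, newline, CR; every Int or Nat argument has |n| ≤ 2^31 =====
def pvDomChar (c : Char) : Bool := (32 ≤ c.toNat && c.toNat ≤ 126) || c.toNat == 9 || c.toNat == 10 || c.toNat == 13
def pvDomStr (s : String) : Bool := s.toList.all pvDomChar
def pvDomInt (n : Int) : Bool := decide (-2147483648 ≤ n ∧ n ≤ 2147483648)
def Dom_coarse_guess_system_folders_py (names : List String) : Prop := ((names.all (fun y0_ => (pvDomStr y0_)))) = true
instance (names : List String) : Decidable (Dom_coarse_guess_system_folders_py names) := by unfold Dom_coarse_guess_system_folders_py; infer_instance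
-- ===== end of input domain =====

-- B inverts the control flow: instead of one name-driven pass building a dict keyed by folder kind,
-- it scans the names once per output slot (first name whose last segment matches that slot's aliases),
-- dropping the redundant INBOX special case; objective: simpler/alternative decomposition, same values.

-- shared helper: the inner `last()` function both Pythons define verbatim
def pyLast (seg : String) : String :=
  PySem.Str.lower (["/", ".", "\\"].foldl
    (fun s d =>
      if PySem.Str.isIn d s then
        (PySem.List.pyGet? ((PySem.Str.split? s d).getD []) (-1)).getD ""
      else s) seg)

-- ===== PORT A =====
def pyWant : List (String × List String) :=
  [("inbox", ["inbox"]),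
   ("drafts", ["draft", "drafts"]),
   ("sent", ["sent", "sent mail", "sent items", "outbox"]),
   ("junk", ["junk", "spam", "bulk"]),
   ("trash", ["trash", "deleted", "bin"]),
   ("archive", ["archive", "archives", "all mail", "all"])]

def stepA (picked : PySem.Dict String String) (n : String) : PySem.Dict String String :=
  let ln := pyLast n
  let up := PySem.Str.upper n
  if up == "INBOX" then picked.setdefault "inbox" n
  else pyWant.foldl (fun d ka =>
    if ka.2.any (fun alt => alt == ln) then d.setdefault ka.1 n else d) picked

def pyOrder : List String := ["inbox", "drafts", "sent", "archive", "junk", "trash"]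

def pyLabels : PySem.Dict String String :=
  PySem.Dict.ofList [("inbox", "Inbox"), ("drafts", "Drafts"), ("sent", "Sent"),
                     ("archive", "Archives"), ("junk", "Junk"), ("trash", "Trash")]

def coarse_guess_system_folders_py (names : List String) : List (List (String × String)) :=
  let picked := names.foldl stepA PySem.Dict.empty
  pyOrder.foldl (fun out k =>
    if picked.contains k then
      out ++ [[("name", (picked.get? k).getD ""), ("label", (pyLabels.get? k).getD "")]]
    else out) []

-- ===== PORT B =====
def tableB : List (String × List String) :=
  [("Inbox", ["inbox"]),
   ("Drafts", ["draft", "drafts"]),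
   ("Sent", ["sent", "sent mail", "sent items", "outbox"]),
   ("Archives", ["archive", "archives", "all mail", "all"]),
   ("Junk", ["junk", "spam", "bulk"]),
   ("Trash", ["trash", "deleted", "bin"])]

def coarse_guess_system_folders_py_alt (names : List String) : List (List (String × String)) :=
  tableB.foldl (fun out la =>
    match names.find? (fun n => la.2.contains (pyLast n)) with
    | some hit => out ++ [[("name", hit), ("label", la.1)]]
    | none => out) []

-- ===== PRECONDITION & SPEC =====
def Spec_coarse_guess_system_folders_py (names : List String) (out : List (List (String × String))) : Prop := out = coarse_guess_system_folders_py_alt names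
instance (names : List String) (out : List (List (String × String))) : Decidable (Spec_coarse_guess_system_folders_py names out) := by unfold Spec_coarse_guess_system_folders_py; infer_instance

-- ===== CLAIM (what is proved, stated in full; the proofs are below) =====
def Claim_equal_coarse_guess_system_folders_py : Prop := ∀ (names : List String), Dom_coarse_guess_system_folders_py names → Spec_coarse_guess_system_folders_py names (coarse_guess_system_folders_py names)

-- ===== LEMMAS AND PROOFS =====

-- a char whose Python uppercase is a given non-lowercase letter is that letter or its lowercase form
theorem upperChar_eq_cases (c u : Char) (hu : ¬ PySem.Chars.islower u)
    (h : PySem.Chars.upperChar c = u) : c = u ∨ c = Char.ofNat (u.toNat + 32) := by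
  unfold PySem.Chars.upperChar at h
  split_ifs at h with hl
  · right
    simp only [PySem.Chars.islower, Bool.and_eq_true, decide_eq_true_eq] at hl
    have h1 : 97 ≤ c.toNat := Nat.succ_le_of_lt hl.1
    have h2 : c.toNat ≤ 122 := hl.2
    have hv : (c.toNat - 32).isValidChar := by unfold Nat.isValidChar; left; omega
    have hto : u.toNat = c.toNat - 32 := by rw [← h, Char.toNat_ofNat, if_pos hv]
    have hv2 : (u.toNat + 32).isValidChar := by unfold Nat.isValidChar; left; omega
    apply Char.ext
    have h3 := Char.toNat_ofNat (u.toNat + 32)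
    rw [if_pos hv2] at h3
    have h4 : c.toNat = (Char.ofNat (u.toNat + 32)).toNat := by omega
    exact UInt32.toNat_inj.mp h4
  · exact Or.inl h

-- A's redundant special case: if n.upper() == "INBOX" then already last(n) == "inbox"
theorem pyLast_of_upper_inbox (n : String) (h : PySem.Str.upper n = "INBOX") :
    pyLast n = "inbox" := by
  have hml : n.toList.map PySem.Chars.upperChar = ['I','N','B','O','X'] := by
    have h2 := congrArg String.toList h
    rw [PySem.Str.toList_upper] at h2
    simpa [PySem.Chars.upper] using h2
  have hn : n = String.ofList n.toList := String.toList_inj.mp String.toList_ofList.symm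
  rcases e : n.toList with _ | ⟨a, _ | ⟨b, _ | ⟨c, _ | ⟨d, _ | ⟨f, _ | ⟨g, t⟩⟩⟩⟩⟩⟩ <;>
    rw [e] at hml <;>
    simp only [List.map_cons, List.map_nil, List.cons.injEq, reduceCtorEq, and_false,
      and_true] at hml
  obtain ⟨ha, hb, hc, hd, hf⟩ := hml
  rcases upperChar_eq_cases a 'I' (by decide) ha with h1 | h1 <;>
  rcases upperChar_eq_cases b 'N' (by decide) hb with h2 | h2 <;>
  rcases upperChar_eq_cases c 'B' (by decide) hc with h3 | h3 <;>
  rcases upperChar_eq_cases d 'O' (by decide) hd with h4 | h4 <;>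
  rcases upperChar_eq_cases f 'X' (by decide) hf with h5 | h5 <;>
    (rw [hn, e, h1, h2, h3, h4, h5]; decide)

-- one conditional-setdefault sweep over an alias table, seen through get? at one key
theorem innerFold_get (entries : List (String × List String))
    (d : PySem.Dict String String) (n k : String) (C : String × List String → Bool) :
    ((entries.foldl (fun d ka => if C ka then d.setdefault ka.1 n else d) d).get? k)
      = (d.get? k).or (if entries.any (fun ka => ka.1 == k && C ka) then some n else none) := by
  induction entries generalizing d with
  | nil => simp
  | cons ka t ih =>
    rw [List.foldl_cons, ih, List.any_cons]
    cases hC : C ka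
    · simp only [Bool.and_false, Bool.false_or]
      simp
    · simp only [Bool.and_true]
      cases hb : (ka.1 == k)
      · have hne : k ≠ ka.1 := fun h => by simp [h] at hb
        simp only [if_true]
        rw [PySem.Dict.get?_setdefault_of_ne _ _ hne]
        simp only [Bool.false_or]
      · have hkeq : ka.1 = k := by simpa using hb
        subst hkeq
        simp only [if_true]
        rw [PySem.Dict.get?_setdefault_self]
        cases h0 : d.get? ka.1 <;> simp

-- effect of one A-step on the entry of one system key: setdefault to n iff the aliases match
theorem stepA_get (d : PySem.Dict String String) (n k : String) (alts : List String)
    (hmem : (k, alts) ∈ pyWant) :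
    (stepA d n).get? k = (d.get? k).or (if alts.contains (pyLast n) then some n else none) := by
  unfold stepA
  simp only []
  by_cases hup : PySem.Str.upper n = "INBOX"
  · rw [if_pos (by simp [hup])]
    have hlast := pyLast_of_upper_inbox n hup
    fin_cases hmem <;> rw [hlast]
    · rw [PySem.Dict.get?_setdefault_self]
      cases h0 : d.get? "inbox" <;> simp
    all_goals rw [PySem.Dict.get?_setdefault_of_ne _ _ (by decide)] <;> simp
  · rw [if_neg (by simp [hup]), innerFold_get]
    fin_cases hmem <;>
      simp [pyWant, List.any_beq']

-- the whole A-pass keeps, per system key, the first name whose last segment matches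
theorem foldl_stepA_get (names : List String) (d : PySem.Dict String String)
    (k : String) (alts : List String) (hmem : (k, alts) ∈ pyWant) :
    ((names.foldl stepA d).get? k)
      = (d.get? k).or (names.find? (fun n => alts.contains (pyLast n))) := by
  induction names generalizing d with
  | nil => simp
  | cons n t ih =>
    rw [List.foldl_cons, ih, stepA_get d n k alts hmem, List.find?_cons]
    cases hp : alts.contains (pyLast n) <;> simp [hp, Option.or_assoc]

theorem ports_agree (names : List String) :
    coarse_guess_system_folders_py names = coarse_guess_system_folders_py_alt names := by
  have h1 := foldl_stepA_get names PySem.Dict.empty "inbox" ["inbox"] (by simp [pyWant])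
  have h2 := foldl_stepA_get names PySem.Dict.empty "drafts" ["draft", "drafts"] (by simp [pyWant])
  have h3 := foldl_stepA_get names PySem.Dict.empty "sent" ["sent", "sent mail", "sent items", "outbox"] (by simp [pyWant])
  have h4 := foldl_stepA_get names PySem.Dict.empty "archive" ["archive", "archives", "all mail", "all"] (by simp [pyWant])
  have h5 := foldl_stepA_get names PySem.Dict.empty "junk" ["junk", "spam", "bulk"] (by simp [pyWant])
  have h6 := foldl_stepA_get names PySem.Dict.empty "trash" ["trash", "deleted", "bin"] (by simp [pyWant])
  simp only [PySem.Dict.get?_empty, Option.none_or] at h1 h2 h3 h4 h5 h6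
  unfold coarse_guess_system_folders_py coarse_guess_system_folders_py_alt
  simp only [pyOrder, tableB, List.foldl_cons, List.foldl_nil,
    PySem.Dict.contains_eq_isSome_get?, h1, h2, h3, h4, h5, h6]
  cases e1 : names.find? (fun n => List.contains ["inbox"] (pyLast n)) <;>
  cases e2 : names.find? (fun n => List.contains ["draft", "drafts"] (pyLast n)) <;>
  cases e3 : names.find? (fun n => List.contains ["sent", "sent mail", "sent items", "outbox"] (pyLast n)) <;>
  cases e4 : names.find? (fun n => List.contains ["archive", "archives", "all mail", "all"] (pyLast n)) <;>
  cases e5 : names.find? (fun n => List.contains ["junk", "spam", "bulk"] (pyLast n)) <;>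
  cases e6 : names.find? (fun n => List.contains ["trash", "deleted", "bin"] (pyLast n)) <;>
    simp [e1, e2, e3, e4, e5, e6, pyLabels] <;> decide

-- ===== VERDICT (by name: the statement is the Claim_ definition above) =====
theorem coarse_guess_system_folders_py_spec : Claim_equal_coarse_guess_system_folders_py := by
  intro names _
  unfold Spec_coarse_guess_system_folders_py
  exact ports_agree names
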